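-- pv_equiv track=rewrite | github.com/sv-pro/agent-hypervisor | src/agent_hypervisor/compiler/emitter.py | _build_capability_matrix
-- ===== SOURCE A (Python) =====
-- def _build_capability_matrix(manifest: dict) -> dict:
--     """
--     Trust level → set of permitted side_effect categories.
--
--     Also includes a reverse index: side_effect → list of trust levels that permit it.
--     """
--     matrix = manifest.get("capability_matrix", {})
--
--     # Normalise to sorted lists for determinism
--     normalised: dict[str, list[str]] = {
--         level: sorted(caps) for level, caps in matrix.items()
--     }
--
--     # Reverse index: side_effect → [trust levels]
--     reverse: dict[str, list[str]] = {}
--     for level, caps in normalised.items():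
--         for cap in caps:
--             reverse.setdefault(cap, []).append(level)
--     reverse = {k: sorted(v) for k, v in sorted(reverse.items())}
--
--     return {
--         "by_trust_level": normalised,
--         "by_side_effect": reverse,
--     }
-- ===== SOURCE B (Python) =====
-- def _build_capability_matrix(manifest: dict) -> dict:
--     matrix = manifest.get("capability_matrix", {})
--
--     normalised = {level: sorted(caps) for level, caps in matrix.items()}
--
--     # Sort-then-group reverse index: flatten the map into (cap, level) pairs and
--     # sort them lexicographically, so equal caps are consecutive and each group's
--     # levels arrive already in order; a single scan then builds the grouped dict.
--     pairs = sorted((cap, level) for level, caps in normalised.items() for cap in caps)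
--     by_side_effect: dict[str, list[str]] = {}
--     for cap, level in pairs:
--         if cap in by_side_effect:
--             by_side_effect[cap].append(level)
--         else:
--             by_side_effect[cap] = [level]
--
--     return {
--         "by_trust_level": normalised,
--         "by_side_effect": by_side_effect,
--     }
-- ===== Notes on version B (the rewrite author's own statement) =====
-- stated objective: alternative
-- what changed: The reverse index is built sort-then-group instead of accumulate-then-sort: B flattens the normalised map into (cap, level) pairs, sorts that pair list lexicographically once, and a single linear scan groups consecutive equal caps, so keys and level lists come out already in final order and A's setdefault accumulation plus the two later sorting passes disappear.
import Mathlib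
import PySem

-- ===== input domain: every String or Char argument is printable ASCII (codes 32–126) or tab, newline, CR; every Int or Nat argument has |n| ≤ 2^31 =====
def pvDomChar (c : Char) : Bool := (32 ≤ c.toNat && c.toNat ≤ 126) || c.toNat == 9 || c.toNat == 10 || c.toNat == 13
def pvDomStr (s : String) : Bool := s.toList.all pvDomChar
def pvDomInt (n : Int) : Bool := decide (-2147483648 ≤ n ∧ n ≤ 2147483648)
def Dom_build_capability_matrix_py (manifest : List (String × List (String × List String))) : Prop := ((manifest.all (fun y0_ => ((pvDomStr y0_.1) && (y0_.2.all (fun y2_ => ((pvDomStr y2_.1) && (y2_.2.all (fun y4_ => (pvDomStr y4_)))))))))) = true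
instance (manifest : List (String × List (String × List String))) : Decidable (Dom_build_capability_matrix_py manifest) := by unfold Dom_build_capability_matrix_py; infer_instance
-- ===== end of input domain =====

-- B builds the reverse index sort-then-group (flatten to (cap,level) pairs, sort once, group
-- consecutive equal caps) instead of A's setdefault accumulation followed by two sorting passes.

-- ===== PORT A =====
-- matrix = manifest.get("capability_matrix", {}); normalised = {level: sorted(caps) …};
-- reverse accumulated via setdefault(cap, []).append(level)  (= Dict.modify cap [] (· ++ [level]));
-- reverse = {k: sorted(v) for k, v in sorted(reverse.items())}  (tuple sort = sorted2 on (fst, snd)).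
def build_capability_matrix_py (manifest : List (String × List (String × List String))) : List (String × List (String × List String)) :=
  let matrix : List (String × List String) := (PySem.Dict.mk manifest).getD "capability_matrix" []
  let normalised : PySem.Dict String (List String) :=
    matrix.foldl (fun d p => d.insert p.1 (PySem.List.sorted p.2 (fun x => x) false)) PySem.Dict.empty
  let reverse : PySem.Dict String (List String) :=
    normalised.items.foldl
      (fun r p => p.2.foldl (fun r cap => r.modify cap [] (fun v => v ++ [p.1])) r)
      PySem.Dict.empty
  let reverse2 : PySem.Dict String (List String) :=
    (PySem.List.sorted2 reverse.items (fun p => p.1) (fun p => p.2) false).foldl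
      (fun d p => d.insert p.1 (PySem.List.sorted p.2 (fun x => x) false)) PySem.Dict.empty
  [("by_trust_level", normalised.items), ("by_side_effect", reverse2.items)]

-- ===== PORT B =====
-- same matrix/normalised; pairs = sorted((cap, level) for level, caps in normalised.items()
-- for cap in caps)  (tuple sort = sorted2 on (fst, snd)); then one scan over pairs:
-- 'if cap in d: d[cap].append(level) else: d[cap] = [level]'  (= Dict.modify cap [] (· ++ [level])).
def build_capability_matrix_py_alt (manifest : List (String × List (String × List String))) : List (String × List (String × List String)) :=
  let matrix : List (String × List String) := (PySem.Dict.mk manifest).getD "capability_matrix" []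
  let normalised : PySem.Dict String (List String) :=
    matrix.foldl (fun d p => d.insert p.1 (PySem.List.sorted p.2 (fun x => x) false)) PySem.Dict.empty
  let pairs : List (String × String) :=
    PySem.List.sorted2 (normalised.items.flatMap (fun p => p.2.map (fun c => (c, p.1))))
      (fun q => q.1) (fun q => q.2) false
  let by_side_effect : PySem.Dict String (List String) :=
    pairs.foldl (fun d q => d.modify q.1 [] (fun v => v ++ [q.2])) PySem.Dict.empty
  [("by_trust_level", normalised.items), ("by_side_effect", by_side_effect.items)]

-- ===== PRECONDITION & SPEC =====
def Spec_build_capability_matrix_py (manifest : List (String × List (String × List String))) (out : List (String × List (String × List String))) : Prop := out = build_capability_matrix_py_alt manifest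
instance (manifest : List (String × List (String × List String))) (out : List (String × List (String × List String))) : Decidable (Spec_build_capability_matrix_py manifest out) := by unfold Spec_build_capability_matrix_py; infer_instance

-- ===== CLAIM (what is proved, stated in full; the proofs are below) =====
def Claim_equal_build_capability_matrix_py : Prop := ∀ (manifest : List (String × List (String × List String))), Dom_build_capability_matrix_py manifest → Spec_build_capability_matrix_py manifest (build_capability_matrix_py manifest)

-- ===== LEMMAS AND PROOFS =====

-- the (cap, level) pairs generated from the normalised items, in generation order
def pvPairs (n : List (String × List String)) : List (String × String) :=
  n.flatMap (fun p => p.2.map (fun c => (c, p.1)))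

def pvCaps (n : List (String × List String)) : List String :=
  n.flatMap (fun p => p.2)

-- levels whose cap list mentions k, with multiplicity, in generation order
def pvOcc (n : List (String × List String)) (k : String) : List String :=
  ((pvPairs n).filter (fun q => q.1 == k)).map (fun q => q.2)

-- the grouping fold ('modify cap [] (· ++ [level])') over an arbitrary pair list
def pvRL (l : List (String × String)) : PySem.Dict String (List String) :=
  l.foldl (fun r q => r.modify q.1 [] (fun v => v ++ [q.2])) PySem.Dict.empty

theorem pvRL_keys (l : List (String × String)) :
    (pvRL l).keys = PySem.Set.ofList (l.map (fun q => q.1)) := by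
  unfold pvRL
  rw [PySem.Dict.keys_foldl_modify_key l (fun q => q.1) [] (fun _ q => fun v => v ++ [q.2])
      PySem.Dict.empty]
  rfl

theorem pvRL_items (l : List (String × String)) :
    (pvRL l).items = (PySem.Set.ofList (l.map (fun q => q.1))).map
      (fun k => (k, (l.filter (fun q => q.1 == k)).map (fun q => q.2))) := by
  rw [PySem.Dict.items_eq_map_keys (pvRL l) (by rw [pvRL_keys]; exact PySem.Set.nodup_ofList _) [],
      pvRL_keys]
  refine List.map_congr_left (fun k _ => ?_)
  unfold pvRL
  rw [PySem.Dict.getD_foldl_modify_append, PySem.Dict.getD_empty]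
  rfl

theorem pvRL_eq_nested (n : List (String × List String)) :
    n.foldl (fun r p => p.2.foldl (fun r cap => r.modify cap [] (fun v => v ++ [p.1])) r)
      PySem.Dict.empty = pvRL (pvPairs n) := by
  unfold pvRL pvPairs
  rw [List.foldl_flatMap]
  exact (PySem.List.foldl_congr_mem n _ _ _ (fun acc p _ => by rw [List.foldl_map])).symm

theorem pvPairs_map_fst (n : List (String × List String)) :
    (pvPairs n).map (fun q => q.1) = pvCaps n := by
  induction n with
  | nil => rfl
  | cons p n ih => simp_all [pvPairs, pvCaps, List.map_map, Function.comp_def]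

-- ---- order facts about the tuple sort ----

-- the comparator sorted2 … fst snd false inserts with
def pvLex (a b : String × String) : Bool :=
  decide (a.1 < b.1) || (!decide (b.1 < a.1) && decide (a.2 < b.2))

theorem sorted2_eq_foldl_pvLex (l : List (String × String)) :
    PySem.List.sorted2 l (fun q => q.1) (fun q => q.2) false
      = l.foldl (fun acc x => PySem.List.insertBy pvLex x acc) [] := rfl

theorem pvLex_irrefl (a : String × String) : pvLex a a = false := by
  simp [pvLex]

theorem pvLex_trans (a b c : String × String) :
    pvLex a b = true → pvLex b c = true → pvLex a c = true := by
  simp only [pvLex, Bool.or_eq_true, Bool.and_eq_true, Bool.not_eq_eq_eq_not, Bool.not_true,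
    decide_eq_true_eq, decide_eq_false_iff_not]
  rintro (h1 | ⟨h1a, h1b⟩) (h2 | ⟨h2a, h2b⟩)
  · exact Or.inl (lt_trans h1 h2)
  · exact Or.inl (lt_of_lt_of_le h1 (not_lt.1 h2a))
  · exact Or.inl (lt_of_le_of_lt (not_lt.1 h1a) h2)
  · exact Or.inr ⟨not_lt.2 (le_trans (not_lt.1 h1a) (not_lt.1 h2a)), lt_trans h1b h2b⟩

theorem pairwise_insertBy (before : String × String → String × String → Bool)
    (htrans : ∀ a b c, before a b = true → before b c = true → before a c = true)
    (hirr : ∀ a, before a a = false)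
    (x : String × String) (acc : List (String × String))
    (hacc : acc.Pairwise (fun a b => before b a = false)) :
    (PySem.List.insertBy before x acc).Pairwise (fun a b => before b a = false) := by
  induction acc with
  | nil => exact List.pairwise_singleton _ _
  | cons y ys ih =>
    rcases List.pairwise_cons.1 hacc with ⟨hy, hys⟩
    show (if before x y then x :: y :: ys else y :: PySem.List.insertBy before x ys).Pairwise _
    by_cases hxy : before x y = true
    · rw [if_pos hxy]
      refine List.pairwise_cons.2 ⟨?_, hacc⟩
      intro z hz
      by_contra hzf
      have hzy : before z y = true := htrans z x y (Bool.of_not_eq_false hzf) hxy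
      rcases List.mem_cons.1 hz with heq | hz'
      · rw [heq] at hzy; simp [hirr] at hzy
      · simp [hy z hz'] at hzy
    · rw [if_neg hxy]
      refine List.pairwise_cons.2 ⟨?_, ih hys⟩
      intro z hz
      rcases (PySem.List.mem_insertBy before x z ys).1 hz with rfl | hz
      · exact Bool.eq_false_iff.2 hxy
      · exact hy z hz

theorem pairwise_foldl_insertBy (before : String × String → String × String → Bool)
    (htrans : ∀ a b c, before a b = true → before b c = true → before a c = true)
    (hirr : ∀ a, before a a = false) :
    ∀ (l acc : List (String × String)), acc.Pairwise (fun a b => before b a = false) →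
      (l.foldl (fun acc x => PySem.List.insertBy before x acc) acc).Pairwise
        (fun a b => before b a = false) := by
  intro l
  induction l with
  | nil => intro acc h; exact h
  | cons x xs ih =>
      intro acc h
      exact ih _ (pairwise_insertBy before htrans hirr x acc h)

theorem sorted2_pairwise (l : List (String × String)) :
    (PySem.List.sorted2 l (fun q => q.1) (fun q => q.2) false).Pairwise
      (fun a b => pvLex b a = false) := by
  rw [sorted2_eq_foldl_pvLex]
  exact pairwise_foldl_insertBy pvLex pvLex_trans pvLex_irrefl l [] List.Pairwise.nil

theorem pvLex_false_fst_le {a b : String × String} (h : pvLex b a = false) : a.1 ≤ b.1 := by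
  simp only [pvLex, Bool.or_eq_false_iff, decide_eq_false_iff_not] at h
  exact not_lt.1 h.1

theorem pvLex_false_snd_le {a b : String × String} (h : pvLex b a = false)
    (hf : a.1 = b.1) : a.2 ≤ b.2 := by
  simp only [pvLex, Bool.or_eq_false_iff, Bool.and_eq_false_iff, Bool.not_eq_eq_eq_not,
    Bool.not_false, decide_eq_true_eq, decide_eq_false_iff_not] at h
  rcases h.2 with h2 | h2
  · exact absurd (hf ▸ le_refl a.1) (not_le.2 h2)
  · exact not_lt.1 h2

-- ---- Set.ofList of an ordered list ----

theorem ofList_sublist (l : List String) : (PySem.Set.ofList l).Sublist l := by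
  induction l with
  | nil => exact List.Sublist.refl _
  | cons x xs ih =>
      rw [PySem.Set.ofList_cons]
      exact List.Sublist.cons₂ x (List.Sublist.trans List.filter_sublist ih)

theorem ofList_pairwise_lt (l : List String) (h : l.Pairwise (· ≤ ·)) :
    (PySem.Set.ofList l).Pairwise (· < ·) := by
  have hle : (PySem.Set.ofList l).Pairwise (· ≤ ·) := List.Pairwise.sublist (ofList_sublist l) h
  exact (hle.and (PySem.Set.nodup_ofList l)).imp (fun hab => lt_of_le_of_ne hab.1 hab.2)

-- ---- the two halves of the grouped result ----

theorem caps_sorted (n : List (String × List String)) :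
    PySem.List.sorted (PySem.Set.ofList (pvCaps n)) (fun x => x) false
      = PySem.Set.ofList ((PySem.List.sorted2 (pvPairs n) (fun q => q.1) (fun q => q.2) false).map
          (fun q => q.1)) := by
  apply PySem.List.sorted_eq_of_perm_of_pairwise_lt
  · refine (List.perm_ext_iff_of_nodup (PySem.Set.nodup_ofList _) (PySem.Set.nodup_ofList _)).2
      (fun a => ?_)
    rw [PySem.Set.mem_ofList, PySem.Set.mem_ofList,
      ((PySem.List.sorted2_perm (pvPairs n) _ _ false).map (fun q => q.1)).mem_iff,
      pvPairs_map_fst]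
  · exact ofList_pairwise_lt _
      ((sorted2_pairwise (pvPairs n)).map _ (fun a b h => pvLex_false_fst_le h))

theorem occ_sorted (n : List (String × List String)) (k : String) :
    PySem.List.sorted (pvOcc n k) (fun x => x) false
      = ((PySem.List.sorted2 (pvPairs n) (fun q => q.1) (fun q => q.2) false).filter
          (fun q => q.1 == k)).map (fun q => q.2) := by
  apply PySem.List.sorted_id_eq_of_perm_of_pairwise
  · exact ((PySem.List.sorted2_perm (pvPairs n) _ _ false).filter _).map _
  · refine List.Pairwise.map _ (fun a b h => h) ?_
    refine List.Pairwise.imp_of_mem (fun {a b} ha hb hab => ?_)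
      ((sorted2_pairwise (pvPairs n)).filter _)
    have hak : a.1 = k := by simpa using (List.mem_filter.1 ha).2
    have hbk : b.1 = k := by simpa using (List.mem_filter.1 hb).2
    exact pvLex_false_snd_le hab (hak.trans hbk.symm)

-- ---- A's side: the accumulate-then-sort result, in the same grouped form ----

theorem pvR_items (n : List (String × List String)) :
    (pvRL (pvPairs n)).items = (PySem.Set.ofList (pvCaps n)).map (fun k => (k, pvOcc n k)) := by
  rw [pvRL_items, pvPairs_map_fst]
  rfl

theorem insertBy_congr (f g : (String × List String) → (String × List String) → Bool)
    (x : String × List String) (acc : List (String × List String))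
    (h : ∀ y ∈ acc, f x y = g x y) :
    PySem.List.insertBy f x acc = PySem.List.insertBy g x acc := by
  induction acc with
  | nil => rfl
  | cons y ys ih =>
      show (if f x y then x :: y :: ys else y :: PySem.List.insertBy f x ys)
         = (if g x y then x :: y :: ys else y :: PySem.List.insertBy g x ys)
      rw [h y (List.mem_cons_self), ih (fun z hz => h z (List.mem_cons_of_mem y hz))]

theorem foldl_insertBy_congr (f g : (String × List String) → (String × List String) → Bool)
    (L : List (String × List String))
    (h : ∀ a b, a ∈ L → b ∈ L → f a b = g a b) :
    ∀ (l acc : List (String × List String)), (∀ x ∈ l, x ∈ L) → (∀ y ∈ acc, y ∈ L) →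
      l.foldl (fun acc x => PySem.List.insertBy f x acc) acc
        = l.foldl (fun acc x => PySem.List.insertBy g x acc) acc := by
  intro l
  induction l with
  | nil => intro acc _ _; rfl
  | cons x xs ih =>
      intro acc hl hacc
      have hx : x ∈ L := hl x (List.mem_cons_self)
      simp only [List.foldl_cons]
      rw [insertBy_congr f g x acc (fun y hy => h x y hx (hacc y hy))]
      exact ih _ (fun z hz => hl z (List.mem_cons_of_mem x hz))
        (fun y hy => ((PySem.List.mem_insertBy g x y acc).1 hy).elim
          (fun he => he ▸ hx) (fun hm => hacc y hm))

-- on items with pairwise-distinct first components, Python's tuple sort is the sort by key fst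
theorem sorted2_eq_sorted_fst (l : List (String × List String))
    (hnd : (l.map (fun p => p.1)).Nodup) :
    PySem.List.sorted2 l (fun p => p.1) (fun p => p.2) false
      = PySem.List.sorted l (fun p => p.1) false := by
  rw [PySem.List.sorted_eq_foldl_insertBy]
  show l.foldl (fun acc x => PySem.List.insertBy
      (fun a b => decide (a.1 < b.1) || (!decide (b.1 < a.1) && decide (a.2 < b.2))) x acc) []
    = l.foldl (fun acc x => PySem.List.insertBy (fun a b => decide (a.1 < b.1)) x acc) []
  apply foldl_insertBy_congr _ _ l _ l [] (fun x hx => hx) (fun y hy => absurd hy (List.not_mem_nil))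
  intro a b ha hb
  by_cases h1 : a.1 < b.1
  · simp [h1]
  · by_cases h2 : b.1 < a.1
    · simp [h2]
    · have : a = b := List.inj_on_of_nodup_map hnd ha hb (le_antisymm (not_lt.1 h2) (not_lt.1 h1))
      subst this
      simp

theorem sorted_pvR_items (n : List (String × List String)) :
    PySem.List.sorted (pvRL (pvPairs n)).items (fun p => p.1) false
      = (PySem.List.sorted (PySem.Set.ofList (pvCaps n)) (fun x => x) false).map
          (fun k => (k, pvOcc n k)) := by
  apply PySem.List.sorted_eq_of_perm_of_pairwise_lt
  · rw [pvR_items]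
    exact (PySem.List.sorted_perm (PySem.Set.ofList (pvCaps n)) (fun x => x) false).map _
  · rw [List.pairwise_map]
    exact PySem.List.sorted_ofList_pairwise_lt (pvCaps n)

-- core: A's reverse-index items equal B's, for any items list n of the normalised dict
theorem pv_reverse_eq (n : List (String × List String)) :
    ((PySem.List.sorted2
        (n.foldl (fun r p => p.2.foldl (fun r cap => r.modify cap [] (fun v => v ++ [p.1])) r)
          PySem.Dict.empty).items (fun p => p.1) (fun p => p.2) false).foldl
      (fun d p => d.insert p.1 (PySem.List.sorted p.2 (fun x => x) false)) PySem.Dict.empty).items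
    = (pvRL (PySem.List.sorted2 (n.flatMap (fun p => p.2.map (fun c => (c, p.1))))
        (fun q => q.1) (fun q => q.2) false)).items := by
  have hperm : (PySem.List.sorted (PySem.Set.ofList (pvCaps n)) (fun x => x) false).Perm
      (PySem.Set.ofList (pvCaps n)) := PySem.List.sorted_perm _ _ _
  have hnodup : (PySem.List.sorted (PySem.Set.ofList (pvCaps n)) (fun x => x) false).Nodup :=
    hperm.nodup_iff.2 (PySem.Set.nodup_ofList _)
  rw [pvRL_eq_nested]
  rw [sorted2_eq_sorted_fst _ (by
        rw [pvR_items, List.map_map]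
        exact (PySem.Set.nodup_ofList (pvCaps n)).map (fun a b h => h))]
  rw [sorted_pvR_items]
  rw [List.foldl_map, PySem.Dict.items_foldl_insert_fresh _ _ _ _
        (fun a _ => PySem.Dict.contains_empty _) (by simpa using hnodup)]
  show _ = (pvRL (PySem.List.sorted2 (pvPairs n) (fun q => q.1) (fun q => q.2) false)).items
  rw [pvRL_items, ← caps_sorted]
  exact List.map_congr_left (fun k _ => by rw [← occ_sorted])

-- ===== VERDICT (by name: the statement is the Claim_ definition above) =====
theorem build_capability_matrix_py_spec : Claim_equal_build_capability_matrix_py := by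
  intro manifest _
  unfold Spec_build_capability_matrix_py build_capability_matrix_py build_capability_matrix_py_alt
  simp only []
  rw [pv_reverse_eq]
  rfl
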